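-- pv_equiv track=rewrite | github.com/tharittk/AoC-2024 | day3/day3.py | accumulate_args
-- ===== SOURCE A (Python) =====
-- def match_mul(line, beg):
--     '''
--     find mul( and return next index to probe
--     '''
--     while beg < len(line)-3:
--         if line[beg:beg+4] == 'mul(':
--             return 'mul(', beg + 4
--         else:
--             beg += 1
--     return '', beg
--
-- def match_arg1(line, beg):
--     '''
--     find first argument '#*3,' and return next index to probe
--     '''
--     arg = ''
--     while beg < len(line):
--         # found comma
--         if len(arg) >= 1 and line[beg] == ",":
--             return arg, beg+1
--
--         # keep accumulating
--         elif line[beg].isnumeric() and len(arg) < 3: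
--             arg += line[beg]
--             beg += 1
--
--        # invalid or cannot accumulate more than 3 digits
--         else:
--             return '', beg
--
--     return '', beg
--
-- def match_arg2(line, beg):
--     '''
--     find second argument '#*3)' and return next index to probe
--     '''
--     arg = ''
--     while beg < len(line):
--
--         # end of arg with valid parenthesis
--         if len(arg) >= 1 and line[beg] == ")":
--             return arg, beg + 1
--
--         # keep accumulating
--         elif line[beg].isnumeric() and len(arg) < 3:
--             arg += line[beg]
--             beg += 1
--
--         # invalid or cannot accumulate more than 3 digits
--         else:
--             return '', beg
--
--     return '', beg
--
-- def accumulate_args(memory):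
--     args1 = []
--     args2 = []
--     beg = 0
--
--     while beg < len(memory):
--
--         _, next_probe = match_mul(memory, beg)
--
--         # not enough for two arguments i.e, #,#)
--         if len(memory) - next_probe < 4:
--             break
--
--         a1, next_probe = match_arg1(memory, next_probe)
--         # start all over
--         if not a1:
--             beg = next_probe
--             continue
--
--         a2, next_probe = match_arg2(memory, next_probe)
--         # start all over
--         if not a2:
--             beg = next_probe
--             continue
--
--         # ok
--         assert(len(a1) >= 1 and len(a1) <= 3)
--         assert(len(a2) >= 1 and len(a2) <= 3)
--         args1.append(int(a1))
--         args2.append(int(a2))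
--
--         beg = next_probe
--
--     return args1, args2
-- ===== SOURCE B (Python) =====
-- def _digits(s, i):
--     # consume up to 3 numeric chars starting at i; (value or None, end index)
--     j = i
--     while j < len(s) and j - i < 3 and s[j].isnumeric():
--         j += 1
--     if j == i:
--         return None, j
--     return int(s[i:j]), j
--
--
-- def _try_match(s, i):
--     # full anchored match of mul(d{1,3},d{1,3}) at position i
--     if s[i:i+4] != 'mul(':
--         return None
--     a, j = _digits(s, i + 4)
--     if a is None or j >= len(s) or s[j] != ',':
--         return None
--     b, k = _digits(s, j + 1)
--     if b is None or k >= len(s) or s[k] != ')':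
--         return None
--     return a, b, k + 1
--
--
-- def accumulate_args(memory):
--     res = []
--     i = 0
--     while i < len(memory):
--         m = _try_match(memory, i)
--         if m is None:
--             i += 1
--         else:
--             res.append((m[0], m[1]))
--             i = m[2]
--     return [a for a, _ in res], [b for _, b in res]
-- ===== Notes on version B (the rewrite author's own statement) =====
-- stated objective: simpler
-- what changed: Replaces A's four index-threading helpers (search for 'mul(', then two stateful argument scanners with restart positions) by a single anchored matcher tried at every position: one digit-run helper used twice, advancing by 1 on failure and past the match on success.
import Mathlib
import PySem

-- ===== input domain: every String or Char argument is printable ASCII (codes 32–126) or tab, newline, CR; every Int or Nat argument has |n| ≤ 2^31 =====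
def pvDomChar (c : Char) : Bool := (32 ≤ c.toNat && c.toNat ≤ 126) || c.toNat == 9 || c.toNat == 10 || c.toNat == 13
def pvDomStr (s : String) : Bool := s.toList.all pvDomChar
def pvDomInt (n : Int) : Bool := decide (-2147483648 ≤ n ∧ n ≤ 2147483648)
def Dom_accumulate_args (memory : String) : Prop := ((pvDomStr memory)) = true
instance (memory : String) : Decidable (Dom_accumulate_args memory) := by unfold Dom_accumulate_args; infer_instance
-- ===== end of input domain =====

-- B replaces A's four index-threading helpers by a single anchored matcher tried at
-- every position (one digit-run helper used twice); objective: simpler, same cost.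


-- ===== PORT A =====
-- match_mul: scan forward for the literal 'mul('.  line[beg:beg+4] with beg ≥ 0 is
-- exactly (cs.drop beg).take 4; 'while beg < len(line)-3' compares Python ints, kept
-- as Int.  The while loop is fuel recursion: beg grows by 1 each turn, so fuel
-- cs.length + 1 (supplied by the paMatchMul wrapper) is never exhausted.
def paMatchMulGo (cs : List Char) : Nat → Nat → List Char × Nat
  | beg, 0 => ([], beg)
  | beg, fuel + 1 =>
    if (beg : Int) < (cs.length : Int) - 3 then
      if (cs.drop beg).take 4 = ['m', 'u', 'l', '('] then (['m', 'u', 'l', '('], beg + 4)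
      else paMatchMulGo cs (beg + 1) fuel
    else ([], beg)

def paMatchMul (cs : List Char) (beg : Nat) : List Char × Nat :=
  paMatchMulGo cs beg (cs.length + 1)

-- match_arg1: the loop body consumes at most 3 digit chars (len(arg) < 3 guards the
-- only repeating branch), so fuel 4 from the wrapper is never exhausted.
-- str.isnumeric coincides with PySem.Chars.isdigit on the printable-ASCII domain.
def paMatchArg1Go (cs : List Char) : List Char → Nat → Nat → List Char × Nat
  | _, beg, 0 => ([], beg)
  | arg, beg, fuel + 1 =>
    if h : beg < cs.length then
      if 1 ≤ arg.length ∧ cs[beg] = ',' then (arg, beg + 1)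
      else if PySem.Chars.isdigit cs[beg] ∧ arg.length < 3 then
        paMatchArg1Go cs (arg ++ [cs[beg]]) (beg + 1) fuel
      else ([], beg)
    else ([], beg)

def paMatchArg1 (cs : List Char) (beg : Nat) : List Char × Nat :=
  paMatchArg1Go cs [] beg 4

-- match_arg2 (same with ')')
def paMatchArg2Go (cs : List Char) : List Char → Nat → Nat → List Char × Nat
  | _, beg, 0 => ([], beg)
  | arg, beg, fuel + 1 =>
    if h : beg < cs.length then
      if 1 ≤ arg.length ∧ cs[beg] = ')' then (arg, beg + 1)
      else if PySem.Chars.isdigit cs[beg] ∧ arg.length < 3 then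
        paMatchArg2Go cs (arg ++ [cs[beg]]) (beg + 1) fuel
      else ([], beg)
    else ([], beg)

def paMatchArg2 (cs : List Char) (beg : Nat) : List Char × Nat :=
  paMatchArg2Go cs [] beg 4

-- accumulate_args' while loop; every continuing iteration moves beg forward by at
-- least 1, so fuel cs.length + 1 is never exhausted.  int(a) on a nonempty digit
-- string never raises, so (PySem.Int.ofChars? …).getD 0 is exact here.
def paGo (cs : List Char) : List Int → List Int → Nat → Nat → List Int × List Int
  | args1, args2, _, 0 => (args1, args2)
  | args1, args2, beg, fuel + 1 =>
    if beg < cs.length then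
      let np0 := (paMatchMul cs beg).2
      if (cs.length : Int) - np0 < 4 then (args1, args2)
      else
        let r1 := paMatchArg1 cs np0
        if r1.1 = [] then paGo cs args1 args2 r1.2 fuel
        else
          let r2 := paMatchArg2 cs r1.2
          if r2.1 = [] then paGo cs args1 args2 r2.2 fuel
          else
            paGo cs (args1 ++ [(PySem.Int.ofChars? r1.1).getD 0])
              (args2 ++ [(PySem.Int.ofChars? r2.1).getD 0]) r2.2 fuel
    else (args1, args2)

def accumulate_args (memory : String) : List Int × List Int :=
  paGo memory.toList [] [] 0 (memory.toList.length + 1)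

-- ===== PORT B =====
-- _digits: consume up to 3 numeric chars from j (started at i); the loop repeats
-- only while j - i < 3, so fuel 3 from the wrapper is never exhausted (at fuel 0 the
-- guard j - i < 3 is false and the Python loop exits the same way).  The exit code
-- after the while loop is pbDigitsEnd; s[i:j] = (drop i).take (j-i), j ≥ i.
def pbDigitsEnd (cs : List Char) (i j : Nat) : Option Int × Nat :=
  if j = i then (none, j)
  else (some ((PySem.Int.ofChars? ((cs.drop i).take (j - i))).getD 0), j)

def pbDigitsGo (cs : List Char) (i : Nat) : Nat → Nat → Option Int × Nat
  | j, 0 => pbDigitsEnd cs i j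
  | j, fuel + 1 =>
    if h : j < cs.length then
      if j - i < 3 ∧ PySem.Chars.isdigit cs[j] then pbDigitsGo cs i (j + 1) fuel
      else pbDigitsEnd cs i j
    else pbDigitsEnd cs i j

def pbDigits (cs : List Char) (i : Nat) : Option Int × Nat :=
  pbDigitsGo cs i i 3

-- _try_match: anchored match of mul(d{1,3},d{1,3}) at i
def pbTry (cs : List Char) (i : Nat) : Option (Int × Int × Nat) :=
  if (cs.drop i).take 4 ≠ ['m', 'u', 'l', '('] then none
  else
    match pbDigits cs (i + 4) with
    | (none, _) => none
    | (some a, j) =>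
      if hj : j < cs.length then
        if cs[j] = ',' then
          match pbDigits cs (j + 1) with
          | (none, _) => none
          | (some b, k) =>
            if hk : k < cs.length then
              if cs[k] = ')' then some (a, b, k + 1) else none
            else none
        else none
      else none

-- scan loop: try a full match at every position, advance by 1 on failure, past the
-- match on success; i grows by at least 1 each turn, so fuel cs.length + 1 from
-- accumulate_args is never exhausted.
def pbScanGo (cs : List Char) : Nat → List (Int × Int) → Nat → List (Int × Int)
  | _, res, 0 => res
  | i, res, fuel + 1 =>
    if i < cs.length then
      match pbTry cs i with
      | none => pbScanGo cs (i + 1) res fuel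
      | some (a, b, i') => pbScanGo cs i' (res ++ [(a, b)]) fuel
    else res

def accumulate_args_alt (memory : String) : List Int × List Int :=
  let res := pbScanGo memory.toList 0 [] (memory.toList.length + 1)
  (res.map (fun p => p.1), res.map (fun p => p.2))

-- ===== PRECONDITION & SPEC =====
def Spec_accumulate_args (memory : String) (out : List Int × List Int) : Prop := out = accumulate_args_alt memory
instance (memory : String) (out : List Int × List Int) : Decidable (Spec_accumulate_args memory out) := by unfold Spec_accumulate_args; infer_instance

-- ===== CLAIM (what is proved, stated in full; the proofs are below) =====
def Claim_equal_accumulate_args : Prop := ∀ (memory : String), Dom_accumulate_args memory → Spec_accumulate_args memory (accumulate_args memory)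

-- ===== LEMMAS AND PROOFS =====

-- 'mul(' occurs at position p
def MulAt (cs : List Char) (p : Nat) : Prop := (cs.drop p).take 4 = ['m', 'u', 'l', '(']

-- number of digit chars consumed from position i, capped at k
def dlen (cs : List Char) : Nat → Nat → Nat
  | _, 0 => 0
  | i, k + 1 =>
    if h : i < cs.length then
      if PySem.Chars.isdigit cs[i] then 1 + dlen cs (i + 1) k else 0
    else 0

-- digit chars are not the delimiters/marker chars the proofs compare against
lemma isdigit_ne (c : Char) (h : PySem.Chars.isdigit c = true) :
    c ≠ 'm' ∧ c ≠ ',' ∧ c ≠ ')' := by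
  refine ⟨?_, ?_, ?_⟩ <;> rintro rfl <;> exact absurd h (by decide)

lemma dlen_add_le (cs : List Char) : ∀ (k i : Nat), i ≤ cs.length → i + dlen cs i k ≤ cs.length := by
  intro k
  induction k with
  | zero => intro i h; simpa [dlen] using h
  | succ k ih =>
    intro i h
    by_cases hi : i < cs.length
    · by_cases hd : PySem.Chars.isdigit cs[i]
      · have := ih (i + 1) (by omega)
        simp only [dlen, dif_pos hi, if_pos hd]
        omega
      · simp [dlen, hi, hd]; omega
    · simp [dlen, hi]; omega

lemma dlen_digit (cs : List Char) :
    ∀ (k i q : Nat), i ≤ q → q < i + dlen cs i k →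
      q < cs.length ∧ PySem.Chars.isdigit (cs.getD q ' ') = true := by
  intro k
  induction k with
  | zero => intro i q h1 h2; simp [dlen] at h2; omega
  | succ k ih =>
    intro i q h1 h2
    by_cases hi : i < cs.length
    · by_cases hd : PySem.Chars.isdigit cs[i]
      · simp only [dlen, dif_pos hi, if_pos hd] at h2
        rcases Nat.eq_or_lt_of_le h1 with rfl | hlt
        · exact ⟨hi, by rw [List.getD_eq_getElem cs ' ' hi]; exact hd⟩
        · exact ih (i + 1) q hlt (by omega)
      · simp [dlen, hi, hd] at h2; omega
    · simp [dlen, hi] at h2; omega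

lemma mulAt_le (cs : List Char) (p : Nat) (h : MulAt cs p) : p + 4 ≤ cs.length := by
  have hl := congrArg List.length h
  simp [List.length_take, List.length_drop] at hl
  omega

lemma mulAt_getD (cs : List Char) (p : Nat) (h : MulAt cs p) :
    cs.getD p ' ' = 'm' ∧ cs.getD (p + 1) ' ' = 'u' ∧
      cs.getD (p + 2) ' ' = 'l' ∧ cs.getD (p + 3) ' ' = '(' := by
  have key : ∀ k : Nat, k < 4 → cs[p + k]? = ['m', 'u', 'l', '('][k]? := by
    intro k hk
    calc cs[p + k]? = (cs.drop p)[k]? := List.getElem?_drop.symm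
    _ = ((cs.drop p).take 4)[k]? := (List.getElem?_take_of_lt hk).symm
    _ = ['m', 'u', 'l', '('][k]? := by rw [h]
  refine ⟨?_, ?_, ?_, ?_⟩
  · have := key 0 (by omega); rw [List.getD_eq_getElem?_getD]; simp at this ⊢; simp [this]
  · have := key 1 (by omega); rw [List.getD_eq_getElem?_getD]; simp at this ⊢; simp [this]
  · have := key 2 (by omega); rw [List.getD_eq_getElem?_getD]; simp at this ⊢; simp [this]
  · have := key 3 (by omega); rw [List.getD_eq_getElem?_getD]; simp at this ⊢; simp [this]

lemma not_mulAt (cs : List Char) (q : Nat) (h : cs.getD q ' ' ≠ 'm') : ¬ MulAt cs q :=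
  fun hm => h (mulAt_getD cs q hm).1

-- the fuel value is irrelevant once it covers the remaining scan distance
lemma paMatchMulGo_congr (cs : List Char) :
    ∀ (f1 f2 beg : Nat), cs.length ≤ beg + f1 → cs.length ≤ beg + f2 →
      paMatchMulGo cs beg f1 = paMatchMulGo cs beg f2 := by
  intro f1
  induction f1 with
  | zero =>
    intro f2 beg h1 h2
    cases f2 with
    | zero => rfl
    | succ g => simp only [paMatchMulGo]; rw [if_neg (by omega)]
  | succ f ih =>
    intro f2 beg h1 h2
    cases f2 with
    | zero => simp only [paMatchMulGo]; rw [if_neg (by omega)]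
    | succ g =>
      simp only [paMatchMulGo]
      by_cases hg : (beg : Int) < (cs.length : Int) - 3
      · rw [if_pos hg, if_pos hg]
        by_cases hm : (cs.drop beg).take 4 = ['m', 'u', 'l', '(']
        · rw [if_pos hm, if_pos hm]
        · rw [if_neg hm, if_neg hm]
          exact ih g (beg + 1) (by omega) (by omega)
      · rw [if_neg hg, if_neg hg]

lemma paMatchMul_found (cs : List Char) (beg : Nat) (h : MulAt cs beg) :
    paMatchMul cs beg = (['m', 'u', 'l', '('], beg + 4) := by
  have h4 := mulAt_le cs beg h
  have h' : List.take 4 (List.drop beg cs) = ['m', 'u', 'l', '('] := h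
  unfold paMatchMul
  simp only [paMatchMulGo]
  rw [if_pos (by omega), if_pos h']

lemma paMatchMul_step (cs : List Char) (beg : Nat)
    (h1 : (beg : Int) < (cs.length : Int) - 3) (h2 : ¬ MulAt cs beg) :
    paMatchMul cs beg = paMatchMul cs (beg + 1) := by
  have h2' : ¬ List.take 4 (List.drop beg cs) = ['m', 'u', 'l', '('] := h2
  unfold paMatchMul
  simp only [paMatchMulGo]
  rw [if_pos h1, if_neg h2']
  exact paMatchMulGo_congr cs cs.length (cs.length + 1) (beg + 1) (by omega) (by omega)

lemma paMatchMul_exit (cs : List Char) (beg : Nat)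
    (h : ¬ ((beg : Int) < (cs.length : Int) - 3)) : paMatchMul cs beg = ([], beg) := by
  unfold paMatchMul
  simp only [paMatchMulGo]
  rw [if_neg h]

lemma paMatchArg1Go_eq (cs : List Char) :
    ∀ (n : Nat) (arg : List Char) (i : Nat), arg.length + n = 3 →
      paMatchArg1Go cs arg i (n + 1) =
        (if i + dlen cs i n < cs.length ∧ 1 ≤ arg.length + dlen cs i n ∧
            cs.getD (i + dlen cs i n) ' ' = ','
         then (arg ++ (cs.drop i).take (dlen cs i n), i + dlen cs i n + 1)
         else ([], i + dlen cs i n)) := by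
  intro n
  induction n with
  | zero =>
    intro arg i hlen
    simp only [paMatchArg1Go, dlen, Nat.add_zero]
    by_cases hi : i < cs.length
    · rw [dif_pos hi]
      by_cases hc : cs[i] = ','
      · rw [if_pos ⟨by omega, hc⟩,
          if_pos ⟨hi, by omega, by rw [List.getD_eq_getElem cs ' ' hi]; exact hc⟩]
        simp
      · rw [if_neg (fun hh => hc hh.2), if_neg (by omega),
          if_neg (fun hh => hc (by rw [List.getD_eq_getElem cs ' ' hi] at hh; exact hh.2.2))]
    · rw [dif_neg hi, if_neg (fun hh => hi hh.1)]
  | succ k ih =>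
    intro arg i hlen
    conv_lhs => rw [paMatchArg1Go]
    by_cases hi : i < cs.length
    · rw [dif_pos hi]
      by_cases hcomma : 1 ≤ arg.length ∧ cs[i] = ','
      · rw [if_pos hcomma]
        have hnd : ¬ PySem.Chars.isdigit cs[i] = true := by
          rw [hcomma.2]; decide
        have hd0 : dlen cs i (k + 1) = 0 := by simp [dlen, hi, hnd]
        rw [hd0, if_pos ⟨by omega, by omega,
          by rw [Nat.add_zero, List.getD_eq_getElem cs ' ' hi]; exact hcomma.2⟩]
        simp
      · rw [if_neg hcomma]
        by_cases hdig : PySem.Chars.isdigit cs[i] = true ∧ arg.length < 3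
        · rw [if_pos hdig]
          have hd : dlen cs i (k + 1) = 1 + dlen cs (i + 1) k := by
            simp [dlen, hi, hdig.1]
          rw [ih (arg ++ [cs[i]]) (i + 1) (by simp; omega), hd]
          set m := dlen cs (i + 1) k with hm
          have hidx : i + 1 + m = i + (1 + m) := by omega
          have hlen2 : (arg ++ [cs[i]]).length + m = arg.length + (1 + m) := by simp; omega
          have harr : (arg ++ [cs[i]]) ++ (cs.drop (i + 1)).take m
              = arg ++ (cs.drop i).take (1 + m) := by
            rw [List.append_assoc]
            congr 1
            rw [List.drop_eq_getElem_cons hi, Nat.add_comm 1 m, List.take_succ_cons]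
            rfl
          rw [hidx, hlen2, harr]
        · rw [if_neg hdig]
          have hd0 : dlen cs i (k + 1) = 0 := by
            by_cases hd : PySem.Chars.isdigit cs[i] = true
            · exact absurd ⟨hd, by omega⟩ hdig
            · simp [dlen, hi, hd]
          have hcond : ¬ (i + 0 < cs.length ∧ 1 ≤ arg.length + 0 ∧ cs.getD (i + 0) ' ' = ',') := by
            rintro ⟨h1, h2, h3⟩
            rw [Nat.add_zero, List.getD_eq_getElem cs ' ' hi] at h3
            exact hcomma ⟨by omega, h3⟩
          rw [hd0, if_neg hcond]
          rfl
    · rw [dif_neg hi]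
      have hd0 : dlen cs i (k + 1) = 0 := by simp [dlen, hi]
      rw [hd0, if_neg (fun hh => hi (by omega))]
      rfl

lemma paMatchArg1_eq (cs : List Char) (i : Nat) :
    paMatchArg1 cs i =
      (if i + dlen cs i 3 < cs.length ∧ 1 ≤ dlen cs i 3 ∧
          cs.getD (i + dlen cs i 3) ' ' = ','
       then ((cs.drop i).take (dlen cs i 3), i + dlen cs i 3 + 1)
       else ([], i + dlen cs i 3)) := by
  have := paMatchArg1Go_eq cs 3 [] i (by simp)
  unfold paMatchArg1
  rw [this]
  simp

lemma paMatchArg2Go_eq (cs : List Char) :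
    ∀ (n : Nat) (arg : List Char) (i : Nat), arg.length + n = 3 →
      paMatchArg2Go cs arg i (n + 1) =
        (if i + dlen cs i n < cs.length ∧ 1 ≤ arg.length + dlen cs i n ∧
            cs.getD (i + dlen cs i n) ' ' = ')'
         then (arg ++ (cs.drop i).take (dlen cs i n), i + dlen cs i n + 1)
         else ([], i + dlen cs i n)) := by
  intro n
  induction n with
  | zero =>
    intro arg i hlen
    simp only [paMatchArg2Go, dlen, Nat.add_zero]
    by_cases hi : i < cs.length
    · rw [dif_pos hi]
      by_cases hc : cs[i] = ')'
      · rw [if_pos ⟨by omega, hc⟩,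
          if_pos ⟨hi, by omega, by rw [List.getD_eq_getElem cs ' ' hi]; exact hc⟩]
        simp
      · rw [if_neg (fun hh => hc hh.2), if_neg (by omega),
          if_neg (fun hh => hc (by rw [List.getD_eq_getElem cs ' ' hi] at hh; exact hh.2.2))]
    · rw [dif_neg hi, if_neg (fun hh => hi hh.1)]
  | succ k ih =>
    intro arg i hlen
    conv_lhs => rw [paMatchArg2Go]
    by_cases hi : i < cs.length
    · rw [dif_pos hi]
      by_cases hcomma : 1 ≤ arg.length ∧ cs[i] = ')'
      · rw [if_pos hcomma]
        have hnd : ¬ PySem.Chars.isdigit cs[i] = true := by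
          rw [hcomma.2]; decide
        have hd0 : dlen cs i (k + 1) = 0 := by simp [dlen, hi, hnd]
        rw [hd0, if_pos ⟨by omega, by omega,
          by rw [Nat.add_zero, List.getD_eq_getElem cs ' ' hi]; exact hcomma.2⟩]
        simp
      · rw [if_neg hcomma]
        by_cases hdig : PySem.Chars.isdigit cs[i] = true ∧ arg.length < 3
        · rw [if_pos hdig]
          have hd : dlen cs i (k + 1) = 1 + dlen cs (i + 1) k := by
            simp [dlen, hi, hdig.1]
          rw [ih (arg ++ [cs[i]]) (i + 1) (by simp; omega), hd]
          set m := dlen cs (i + 1) k with hm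
          have hidx : i + 1 + m = i + (1 + m) := by omega
          have hlen2 : (arg ++ [cs[i]]).length + m = arg.length + (1 + m) := by simp; omega
          have harr : (arg ++ [cs[i]]) ++ (cs.drop (i + 1)).take m
              = arg ++ (cs.drop i).take (1 + m) := by
            rw [List.append_assoc]
            congr 1
            rw [List.drop_eq_getElem_cons hi, Nat.add_comm 1 m, List.take_succ_cons]
            rfl
          rw [hidx, hlen2, harr]
        · rw [if_neg hdig]
          have hd0 : dlen cs i (k + 1) = 0 := by
            by_cases hd : PySem.Chars.isdigit cs[i] = true
            · exact absurd ⟨hd, by omega⟩ hdig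
            · simp [dlen, hi, hd]
          have hcond : ¬ (i + 0 < cs.length ∧ 1 ≤ arg.length + 0 ∧ cs.getD (i + 0) ' ' = ')') := by
            rintro ⟨h1, h2, h3⟩
            rw [Nat.add_zero, List.getD_eq_getElem cs ' ' hi] at h3
            exact hcomma ⟨by omega, h3⟩
          rw [hd0, if_neg hcond]
          rfl
    · rw [dif_neg hi]
      have hd0 : dlen cs i (k + 1) = 0 := by simp [dlen, hi]
      rw [hd0, if_neg (fun hh => hi (by omega))]
      rfl

lemma paMatchArg2_eq (cs : List Char) (i : Nat) :
    paMatchArg2 cs i =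
      (if i + dlen cs i 3 < cs.length ∧ 1 ≤ dlen cs i 3 ∧
          cs.getD (i + dlen cs i 3) ' ' = ')'
       then ((cs.drop i).take (dlen cs i 3), i + dlen cs i 3 + 1)
       else ([], i + dlen cs i 3)) := by
  have := paMatchArg2Go_eq cs 3 [] i (by simp)
  unfold paMatchArg2
  rw [this]
  simp

lemma pbDigitsGo_ge (cs : List Char) (i : Nat) :
    ∀ (fuel j : Nat), j ≤ (pbDigitsGo cs i j fuel).2 := by
  intro fuel
  induction fuel with
  | zero =>
    intro j
    simp only [pbDigitsGo, pbDigitsEnd]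
    split <;> simp
  | succ f ih =>
    intro j
    simp only [pbDigitsGo]
    by_cases hj : j < cs.length
    · rw [dif_pos hj]
      by_cases hc : j - i < 3 ∧ PySem.Chars.isdigit cs[j] = true
      · rw [if_pos hc]
        have := ih (j + 1)
        omega
      · rw [if_neg hc]
        simp only [pbDigitsEnd]
        split <;> simp
    · rw [dif_neg hj]
      simp only [pbDigitsEnd]
      split <;> simp

lemma pbDigitsGo_eq (cs : List Char) (i : Nat) :
    ∀ (n j : Nat), i ≤ j → (j - i) + n = 3 →
      pbDigitsGo cs i j n =
        (if j + dlen cs j n = i then (none, i)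
         else (some ((PySem.Int.ofChars? ((cs.drop i).take (j + dlen cs j n - i))).getD 0),
               j + dlen cs j n)) := by
  intro n
  induction n with
  | zero =>
    intro j hij hsum
    have hji : j ≠ i := by omega
    simp only [pbDigitsGo, pbDigitsEnd, dlen, Nat.add_zero]
    rw [if_neg hji, if_neg hji]
  | succ k ih =>
    intro j hij hsum
    simp only [pbDigitsGo]
    by_cases hj : j < cs.length
    · rw [dif_pos hj]
      by_cases hd : PySem.Chars.isdigit cs[j] = true
      · rw [if_pos ⟨by omega, hd⟩, ih (j + 1) (by omega) (by omega)]
        have hdl : dlen cs j (k + 1) = 1 + dlen cs (j + 1) k := by simp [dlen, hj, hd]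
        rw [hdl]
        have hidx : j + 1 + dlen cs (j + 1) k = j + (1 + dlen cs (j + 1) k) := by omega
        rw [hidx]
      · rw [if_neg (fun hh => hd hh.2)]
        have hd0 : dlen cs j (k + 1) = 0 := by simp [dlen, hj, hd]
        rw [hd0]
        simp only [pbDigitsEnd]
        by_cases hji : j = i
        · rw [if_pos hji, if_pos (by omega)]; rw [hji]
        · rw [if_neg hji, if_neg (by omega)]
          rfl
    · rw [dif_neg hj]
      have hd0 : dlen cs j (k + 1) = 0 := by simp [dlen, hj]
      rw [hd0]
      simp only [pbDigitsEnd]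
      by_cases hji : j = i
      · rw [if_pos hji, if_pos (by omega)]; rw [hji]
      · rw [if_neg hji, if_neg (by omega)]
        rfl

lemma pbDigits_eq (cs : List Char) (i : Nat) :
    pbDigits cs i =
      (if dlen cs i 3 = 0 then (none, i)
       else (some ((PySem.Int.ofChars? ((cs.drop i).take (dlen cs i 3))).getD 0),
             i + dlen cs i 3)) := by
  unfold pbDigits
  rw [pbDigitsGo_eq cs i 3 i le_rfl (by omega)]
  by_cases h : dlen cs i 3 = 0
  · rw [if_pos (by omega), if_pos h]
  · rw [if_neg (by omega), if_neg h, Nat.add_sub_cancel_left]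

lemma pbTry_gt (cs : List Char) (i : Nat) {a b : Int} {i' : Nat}
    (h : pbTry cs i = some (a, b, i')) : i < i' := by
  unfold pbTry at h
  split at h
  · exact absurd h (by simp)
  · rcases hd1 : pbDigits cs (i + 4) with ⟨a1, j⟩
    have hj4 : i + 4 ≤ j := by
      have := pbDigitsGo_ge cs (i + 4) 3 (i + 4)
      rw [show pbDigitsGo cs (i + 4) (i + 4) 3 = pbDigits cs (i + 4) from rfl, hd1] at this
      exact this
    rw [hd1] at h
    rcases a1 with _ | a0
    · simp at h
    · dsimp only at h
      split at h
      · split at h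
        · rcases hd2 : pbDigits cs (j + 1) with ⟨b1, k⟩
          have hk1 : j + 1 ≤ k := by
            have := pbDigitsGo_ge cs (j + 1) 3 (j + 1)
            rw [show pbDigitsGo cs (j + 1) (j + 1) 3 = pbDigits cs (j + 1) from rfl, hd2] at this
            exact this
          rw [hd2] at h
          rcases b1 with _ | b0
          · simp at h
          · dsimp only at h
            split at h
            · split at h
              · rcases h with ⟨⟩; omega
              · simp at h
            · simp at h
        · simp at h
      · simp at h

lemma pbTry_eq (cs : List Char) (i : Nat) :
    pbTry cs i =
      (if (cs.drop i).take 4 = ['m', 'u', 'l', '('] then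
        (if 1 ≤ dlen cs (i + 4) 3 ∧ i + 4 + dlen cs (i + 4) 3 < cs.length ∧
            cs.getD (i + 4 + dlen cs (i + 4) 3) ' ' = ','
         then
           (if 1 ≤ dlen cs (i + 4 + dlen cs (i + 4) 3 + 1) 3 ∧
               i + 4 + dlen cs (i + 4) 3 + 1 + dlen cs (i + 4 + dlen cs (i + 4) 3 + 1) 3 < cs.length ∧
               cs.getD (i + 4 + dlen cs (i + 4) 3 + 1 + dlen cs (i + 4 + dlen cs (i + 4) 3 + 1) 3) ' ' = ')'
            then some ((PySem.Int.ofChars? ((cs.drop (i + 4)).take (dlen cs (i + 4) 3))).getD 0,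
                  (PySem.Int.ofChars? ((cs.drop (i + 4 + dlen cs (i + 4) 3 + 1)).take
                    (dlen cs (i + 4 + dlen cs (i + 4) 3 + 1) 3))).getD 0,
                  i + 4 + dlen cs (i + 4) 3 + 1 + dlen cs (i + 4 + dlen cs (i + 4) 3 + 1) 3 + 1)
            else none)
         else none)
      else none) := by
  unfold pbTry
  by_cases hmul : (cs.drop i).take 4 = ['m', 'u', 'l', '(']
  · rw [if_neg (not_not_intro hmul), if_pos hmul, pbDigits_eq cs (i + 4)]
    set m1 := dlen cs (i + 4) 3 with hm1
    by_cases h1 : m1 = 0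
    · rw [if_pos h1]
      dsimp only
      rw [if_neg (fun hc => by omega)]
    · rw [if_neg h1]
      dsimp only
      by_cases hj : i + 4 + m1 < cs.length
      · rw [dif_pos hj]
        have hgd : cs.getD (i + 4 + m1) ' ' = cs[i + 4 + m1] := List.getD_eq_getElem cs ' ' hj
        by_cases hc : cs[i + 4 + m1] = ','
        · rw [if_pos hc, pbDigits_eq cs (i + 4 + m1 + 1)]
          set m2 := dlen cs (i + 4 + m1 + 1) 3 with hm2
          have hcd : cs.getD (i + 4 + m1) ' ' = ',' := by rw [hgd]; exact hc
          by_cases h2 : m2 = 0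
          · rw [if_pos h2]
            dsimp only
            rw [if_pos ⟨by omega, hj, hcd⟩, if_neg (fun hc2 => by omega)]
          · rw [if_neg h2]
            dsimp only
            by_cases hk : i + 4 + m1 + 1 + m2 < cs.length
            · rw [dif_pos hk]
              by_cases hp : cs[i + 4 + m1 + 1 + m2] = ')'
              · rw [if_pos hp, if_pos ⟨by omega, hj, hcd⟩,
                  if_pos ⟨by omega, hk, by rw [List.getD_eq_getElem cs ' ' hk]; exact hp⟩]
              · rw [if_neg hp, if_pos ⟨by omega, hj, hcd⟩, if_neg ?_]
                rintro ⟨_, _, hgd2⟩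
                rw [List.getD_eq_getElem cs ' ' hk] at hgd2
                exact hp hgd2
            · rw [dif_neg hk, if_pos ⟨by omega, hj, hcd⟩, if_neg (fun hc2 => hk hc2.2.1)]
        · rw [if_neg hc, if_neg ?_]
          rintro ⟨_, _, hgd2⟩
          rw [hgd] at hgd2
          exact hc hgd2
      · rw [dif_neg hj, if_neg (fun hc => hj hc.2.1)]
  · rw [if_pos hmul, if_neg hmul]

lemma pbTry_none_of_not_mulAt (cs : List Char) (i : Nat) (h : ¬ MulAt cs i) :
    pbTry cs i = none := by
  rw [pbTry_eq]
  exact if_neg h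

lemma pbTry_none_small (cs : List Char) (i : Nat) (h : cs.length < i + 8) :
    pbTry cs i = none := by
  rw [pbTry_eq]
  by_cases hmul : (cs.drop i).take 4 = ['m', 'u', 'l', '(']
  · rw [if_pos hmul]
    by_cases h1 : 1 ≤ dlen cs (i + 4) 3 ∧ i + 4 + dlen cs (i + 4) 3 < cs.length ∧
        cs.getD (i + 4 + dlen cs (i + 4) 3) ' ' = ','
    · rw [if_pos h1, if_neg ?_]
      rintro ⟨hm2, hk, _⟩
      omega
    · rw [if_neg h1]
  · rw [if_neg hmul]

-- fuel irrelevance for the scan loop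
lemma pbScanGo_congr (cs : List Char) :
    ∀ (f1 f2 i : Nat) (res : List (Int × Int)), cs.length ≤ i + f1 → cs.length ≤ i + f2 →
      pbScanGo cs i res f1 = pbScanGo cs i res f2 := by
  intro f1
  induction f1 with
  | zero =>
    intro f2 i res h1 h2
    cases f2 with
    | zero => rfl
    | succ g => simp only [pbScanGo]; rw [if_neg (by omega)]
  | succ f ih =>
    intro f2 i res h1 h2
    cases f2 with
    | zero => simp only [pbScanGo]; rw [if_neg (by omega)]
    | succ g =>
      simp only [pbScanGo]
      by_cases hi : i < cs.length
      · rw [if_pos hi, if_pos hi]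
        rcases hm : pbTry cs i with _ | ⟨a, b, i'⟩
        · exact ih g (i + 1) res (by omega) (by omega)
        · have hgt := pbTry_gt cs i hm
          exact ih g i' (res ++ [(a, b)]) (by omega) (by omega)
      · rw [if_neg hi, if_neg hi]

-- the scan at position i with its canonical fuel (what the proofs manipulate)
def scanF (cs : List Char) (i : Nat) : List (Int × Int) :=
  pbScanGo cs i [] (cs.length + 1)

lemma scanF_exit (cs : List Char) (i : Nat) (hi : ¬ i < cs.length) : scanF cs i = [] := by
  unfold scanF
  simp only [pbScanGo]
  rw [if_neg hi]

lemma scanF_step_none (cs : List Char) (i : Nat)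
    (hi : i < cs.length) (hm : pbTry cs i = none) : scanF cs i = scanF cs (i + 1) := by
  unfold scanF
  simp only [pbScanGo]
  rw [if_pos hi, hm]
  dsimp only
  exact pbScanGo_congr cs cs.length (cs.length + 1) (i + 1) [] (by omega) (by omega)

lemma pbScanGo_acc (cs : List Char) :
    ∀ (fuel i : Nat), cs.length ≤ i + fuel →
      ∀ res, pbScanGo cs i res fuel = res ++ pbScanGo cs i [] fuel := by
  intro fuel
  induction fuel with
  | zero => intro i h res; simp [pbScanGo]
  | succ f ih =>
    intro i h res
    simp only [pbScanGo]
    by_cases hi : i < cs.length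
    · rw [if_pos hi, if_pos hi]
      rcases hm : pbTry cs i with _ | ⟨a, b, i'⟩
      · exact ih (i + 1) (by omega) res
      · have hgt := pbTry_gt cs i hm
        dsimp only
        rw [ih i' (by omega) (res ++ [(a, b)]), ih i' (by omega) ([] ++ [(a, b)])]
        simp
    · rw [if_neg hi, if_neg hi]; simp

lemma scanF_step_some (cs : List Char) (i : Nat) {a b : Int} {i' : Nat}
    (hi : i < cs.length) (hm : pbTry cs i = some (a, b, i')) :
    scanF cs i = (a, b) :: scanF cs i' := by
  unfold scanF
  simp only [pbScanGo]
  rw [if_pos hi, hm]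
  dsimp only
  have hgt := pbTry_gt cs i hm
  rw [pbScanGo_acc cs cs.length i' (by omega) ([] ++ [(a, b)]),
    pbScanGo_congr cs cs.length (cs.length + 1) i' [] (by omega) (by omega)]
  rfl

lemma scanF_small (cs : List Char) :
    ∀ (n i : Nat), cs.length ≤ i + n → cs.length < i + 8 → scanF cs i = [] := by
  intro n
  induction n with
  | zero => intro i h h8; exact scanF_exit cs i (by omega)
  | succ n ih =>
    intro i h h8
    by_cases hi : i < cs.length
    · rw [scanF_step_none cs i hi (pbTry_none_small cs i h8)]
      exact ih (i + 1) (by omega) (by omega)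
    · exact scanF_exit cs i hi

lemma scanF_skip (cs : List Char) :
    ∀ (d a b : Nat), b ≤ a + d → a ≤ b → b ≤ cs.length →
      (∀ q, a ≤ q → q < b → ¬ MulAt cs q) → scanF cs a = scanF cs b := by
  intro d
  induction d with
  | zero =>
    intro a b h1 h2 _ _
    have : a = b := by omega
    rw [this]
  | succ d ih =>
    intro a b h1 h2 hble hq
    by_cases hab : a = b
    · rw [hab]
    · have halt : a < cs.length := by omega
      rw [scanF_step_none cs a halt
        (pbTry_none_of_not_mulAt cs a (hq a le_rfl (by omega)))]
      exact ih (a + 1) b (by omega) (by omega) hble (fun q hq1 hq2 => hq q (by omega) hq2)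

-- no 'mul(' can start strictly inside a partial match consumed by A
lemma skip_no_mul1 (cs : List Char) (beg m1 : Nat) (hmul : MulAt cs beg)
    (hd1 : ∀ q, beg + 4 ≤ q → q < beg + 4 + m1 →
      q < cs.length ∧ PySem.Chars.isdigit (cs.getD q ' ') = true) :
    ∀ q, beg + 1 ≤ q → q < beg + 4 + m1 → ¬ MulAt cs q := by
  intro q hq1 hq2
  apply not_mulAt
  rcases mulAt_getD cs beg hmul with ⟨_, hgu, hgl, hgp⟩
  by_cases e1 : q = beg + 1
  · rw [e1, hgu]; decide
  by_cases e2 : q = beg + 2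
  · rw [e2, hgl]; decide
  by_cases e3 : q = beg + 3
  · rw [e3, hgp]; decide
  exact ((isdigit_ne _ (hd1 q (by omega) hq2).2).1)

lemma skip_no_mul2 (cs : List Char) (beg m1 m2 : Nat) (hmul : MulAt cs beg)
    (hd1 : ∀ q, beg + 4 ≤ q → q < beg + 4 + m1 →
      q < cs.length ∧ PySem.Chars.isdigit (cs.getD q ' ') = true)
    (hcm : cs.getD (beg + 4 + m1) ' ' = ',')
    (hd2 : ∀ q, beg + 4 + m1 + 1 ≤ q → q < beg + 4 + m1 + 1 + m2 →
      q < cs.length ∧ PySem.Chars.isdigit (cs.getD q ' ') = true) :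
    ∀ q, beg + 1 ≤ q → q < beg + 4 + m1 + 1 + m2 → ¬ MulAt cs q := by
  intro q hq1 hq2
  by_cases hlo : q < beg + 4 + m1
  · exact skip_no_mul1 cs beg m1 hmul hd1 q hq1 hlo
  apply not_mulAt
  by_cases e4 : q = beg + 4 + m1
  · rw [e4, hcm]; decide
  exact ((isdigit_ne _ (hd2 q (by omega) hq2).2).1)

-- the main simulation: A's outer loop appends exactly what B's scan collects
lemma paGo_eq (cs : List Char) :
    ∀ (n fuel beg : Nat) (a1 a2 : List Int), cs.length ≤ beg + n → n ≤ fuel →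
      paGo cs a1 a2 beg fuel =
        (a1 ++ (scanF cs beg).map Prod.fst, a2 ++ (scanF cs beg).map Prod.snd) := by
  intro n
  induction n with
  | zero =>
    intro fuel beg a1 a2 h _
    cases fuel with
    | zero =>
      simp only [paGo]
      rw [scanF_exit cs beg (by omega)]
      simp
    | succ f =>
      simp only [paGo]
      rw [if_neg (by omega), scanF_exit cs beg (by omega)]
      simp
  | succ n ih =>
    intro fuel beg a1 a2 hlen hfuel
    by_cases hbeg : beg < cs.length
    case neg =>
      cases fuel with
      | zero =>
        simp only [paGo]
        rw [scanF_exit cs beg hbeg]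
        simp
      | succ f =>
        simp only [paGo]
        rw [if_neg hbeg, scanF_exit cs beg hbeg]
        simp
    case pos =>
    rcases fuel with _ | f
    · omega
    by_cases hmul : MulAt cs beg
    · have hmul' : List.take 4 (List.drop beg cs) = ['m', 'u', 'l', '('] := hmul
      have hfound := paMatchMul_found cs beg hmul
      have h4 := mulAt_le cs beg hmul
      by_cases hroom : cs.length < beg + 8
      · simp only [paGo]
        rw [if_pos hbeg, hfound]
        dsimp only
        rw [if_pos (by omega), scanF_small cs (n + 1) beg (by omega) hroom]
        simp
      · have hlen8 : beg + 8 ≤ cs.length := by omega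
        simp only [paGo]
        rw [if_pos hbeg, hfound]
        dsimp only
        rw [if_neg (by omega), paMatchArg1_eq cs (beg + 4)]
        set m1 := dlen cs (beg + 4) 3 with hm1
        have hp1le : beg + 4 + m1 ≤ cs.length := dlen_add_le cs 3 (beg + 4) (by omega)
        have hdig1 : ∀ q, beg + 4 ≤ q → q < beg + 4 + m1 →
            q < cs.length ∧ PySem.Chars.isdigit (cs.getD q ' ') = true := by
          intro q h1 h2
          exact dlen_digit cs 3 (beg + 4) q h1 (by omega)
        by_cases hc1 : beg + 4 + m1 < cs.length ∧ 1 ≤ m1 ∧ cs.getD (beg + 4 + m1) ' ' = ','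
        · rw [if_pos hc1]
          dsimp only
          have hne1 : (cs.drop (beg + 4)).take m1 ≠ [] := by
            have hlen : ((cs.drop (beg + 4)).take m1).length = m1 := by
              simp [List.length_take, List.length_drop]
              omega
            intro hnil
            rw [hnil] at hlen
            simp at hlen
            omega
          rw [if_neg hne1, paMatchArg2_eq cs (beg + 4 + m1 + 1)]
          set m2 := dlen cs (beg + 4 + m1 + 1) 3 with hm2
          have hp2le : beg + 4 + m1 + 1 + m2 ≤ cs.length :=
            dlen_add_le cs 3 (beg + 4 + m1 + 1) (by omega)
          have hdig2 : ∀ q, beg + 4 + m1 + 1 ≤ q → q < beg + 4 + m1 + 1 + m2 →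
              q < cs.length ∧ PySem.Chars.isdigit (cs.getD q ' ') = true := by
            intro q h1 h2
            exact dlen_digit cs 3 (beg + 4 + m1 + 1) q h1 (by omega)
          by_cases hc2 : beg + 4 + m1 + 1 + m2 < cs.length ∧ 1 ≤ m2 ∧
              cs.getD (beg + 4 + m1 + 1 + m2) ' ' = ')'
          · rw [if_pos hc2]
            dsimp only
            have hne2 : (cs.drop (beg + 4 + m1 + 1)).take m2 ≠ [] := by
              have hlen : ((cs.drop (beg + 4 + m1 + 1)).take m2).length = m2 := by
                simp [List.length_take, List.length_drop]
                omega
              intro hnil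
              rw [hnil] at hlen
              simp at hlen
              omega
            rw [if_neg hne2, ih f (beg + 4 + m1 + 1 + m2 + 1) _ _ (by omega) (by omega)]
            have htry : pbTry cs beg =
                some ((PySem.Int.ofChars? ((cs.drop (beg + 4)).take m1)).getD 0,
                  (PySem.Int.ofChars? ((cs.drop (beg + 4 + m1 + 1)).take m2)).getD 0,
                  beg + 4 + m1 + 1 + m2 + 1) := by
              rw [pbTry_eq, if_pos hmul', if_pos ⟨hc1.2.1, hc1.1, hc1.2.2⟩,
                if_pos ⟨hc2.2.1, hc2.1, hc2.2.2⟩]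
            rw [scanF_step_some cs beg hbeg htry]
            simp
          · rw [if_neg hc2]
            dsimp only
            rw [if_pos rfl, ih f (beg + 4 + m1 + 1 + m2) _ _ (by omega) (by omega)]
            have htry : pbTry cs beg = none := by
              rw [pbTry_eq, if_pos hmul', if_pos ⟨hc1.2.1, hc1.1, hc1.2.2⟩,
                if_neg (fun hc => hc2 ⟨hc.2.1, hc.1, hc.2.2⟩)]
            rw [scanF_step_none cs beg hbeg htry,
              scanF_skip cs (beg + 4 + m1 + 1 + m2 - (beg + 1)) (beg + 1)
                (beg + 4 + m1 + 1 + m2) (by omega) (by omega) hp2le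
                (skip_no_mul2 cs beg m1 m2 hmul hdig1 hc1.2.2 hdig2)]
        · rw [if_neg hc1]
          dsimp only
          rw [if_pos rfl, ih f (beg + 4 + m1) _ _ (by omega) (by omega)]
          have htry : pbTry cs beg = none := by
            rw [pbTry_eq, if_pos hmul', if_neg (fun hc => hc1 ⟨hc.2.1, hc.1, hc.2.2⟩)]
          rw [scanF_step_none cs beg hbeg htry,
            scanF_skip cs (beg + 4 + m1 - (beg + 1)) (beg + 1) (beg + 4 + m1)
              (by omega) (by omega) hp1le (skip_no_mul1 cs beg m1 hmul hdig1)]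
    · by_cases hg : (beg : Int) < (cs.length : Int) - 3
      · have hstep := paMatchMul_step cs beg hg hmul
        have hbeg1 : beg + 1 < cs.length := by omega
        have hAB : paGo cs a1 a2 beg (f + 1) = paGo cs a1 a2 (beg + 1) (f + 1) := by
          conv_lhs => rw [paGo]
          conv_rhs => rw [paGo]
          rw [if_pos hbeg, if_pos hbeg1, hstep]
        rw [hAB, ih (f + 1) (beg + 1) a1 a2 (by omega) (by omega),
          scanF_step_none cs beg hbeg (pbTry_none_of_not_mulAt cs beg hmul)]
      · simp only [paGo]
        rw [if_pos hbeg, paMatchMul_exit cs beg hg]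
        dsimp only
        rw [if_pos (by omega), scanF_small cs (n + 1) beg (by omega) (by omega)]
        simp

theorem accumulate_args_spec : Claim_equal_accumulate_args := by
  intro memory _
  unfold Spec_accumulate_args accumulate_args accumulate_args_alt
  rw [paGo_eq memory.toList (memory.toList.length + 1) (memory.toList.length + 1) 0 [] [] (by omega) (by omega)]
  rfl
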